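-- pv_equiv track=rewrite | github.com/efekaraduman/Prompt-Sentinel | app/clustering.py | build_sketch
-- ===== SOURCE A (Python) =====
-- _K = 16          # sketch size
--
-- _MAX_GRAMS = 512  # cap trigrams to avoid huge inputs
--
-- def _fnv32(s: str) -> int:
--     """FNV-1a 32-bit hash — fast, no stdlib crypto overhead."""
--     h = 0x811C9DC5
--     for ch in s.encode():
--         h ^= ch
--         h = (h * 0x01000193) & 0xFFFFFFFF
--     return h
--
-- def build_sketch(normalized_text: str, k: int = _K) -> list[int]:
--     """Return a sorted list of the K smallest FNV-32 trigram hashes."""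
--     words = normalized_text.split()
--     trigrams: list[str] = []
--     for i in range(len(words) - 2):
--         trigrams.append(f"{words[i]} {words[i+1]} {words[i+2]}")
--         if len(trigrams) >= _MAX_GRAMS:
--             break
--
--     if not trigrams:
--         # fallback: character 4-grams
--         t = normalized_text
--         trigrams = [t[i:i+4] for i in range(0, len(t) - 3, 2)][:_MAX_GRAMS]
--
--     hashes = sorted(_fnv32(g) for g in trigrams)
--     return hashes[:k] if len(hashes) >= k else hashes
-- ===== SOURCE B (Python) =====
-- _K = 16          # sketch size
--
-- _MAX_GRAMS = 512  # cap trigrams to avoid huge inputs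
--
--
-- def _fnv32(s: str) -> int:
--     """FNV-1a 32-bit hash — fast, no stdlib crypto overhead."""
--     h = 0x811C9DC5
--     for ch in s.encode():
--         h ^= ch
--         h = (h * 0x01000193) & 0xFFFFFFFF
--     return h
--
--
-- def _insert_bounded(x: int, ys: list[int], k: int) -> list[int]:
--     """Insert x into ascending ys (after equals) and keep at most the k smallest."""
--     lo = 0
--     while lo < len(ys) and ys[lo] <= x:
--         lo += 1
--     zs = ys[:lo] + [x] + ys[lo:]
--     return zs[:-1] if len(zs) > k else zs
--
--
-- def build_sketch(normalized_text: str, k: int = _K) -> list[int]: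
--     """Bounded selection over zip-built grams: keep only the k smallest hashes
--     at any time instead of sorting the full hash list and slicing."""
--     words = normalized_text.split()
--     grams = [' '.join(t) for t in zip(words, words[1:], words[2:])][:_MAX_GRAMS]
--     if not grams:
--         t = normalized_text
--         i = 0
--         while i + 4 <= len(t) and len(grams) < _MAX_GRAMS:
--             grams.append(t[i:i + 4])
--             i += 2
--     best: list[int] = []
--     for g in grams:
--         best = _insert_bounded(_fnv32(g), best, k)
--     return best
-- ===== Notes on version B (the rewrite author's own statement) =====
-- stated objective: faster
-- what changed: B builds the trigrams by zipping the word list with its two shifted copies (and the character-4-gram fallback by a while loop over a start index) instead of an index loop with a break, and replaces sort-everything-then-slice by a bounded selection that keeps only the k smallest hashes at any time (insert into a sorted k-list, drop the largest); only the _fnv32 hash loop is kept unchanged.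
-- outside the precondition, e.g. on build_sketch('a b c d', -1): A returns [1995710639], B returns []
import Mathlib
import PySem

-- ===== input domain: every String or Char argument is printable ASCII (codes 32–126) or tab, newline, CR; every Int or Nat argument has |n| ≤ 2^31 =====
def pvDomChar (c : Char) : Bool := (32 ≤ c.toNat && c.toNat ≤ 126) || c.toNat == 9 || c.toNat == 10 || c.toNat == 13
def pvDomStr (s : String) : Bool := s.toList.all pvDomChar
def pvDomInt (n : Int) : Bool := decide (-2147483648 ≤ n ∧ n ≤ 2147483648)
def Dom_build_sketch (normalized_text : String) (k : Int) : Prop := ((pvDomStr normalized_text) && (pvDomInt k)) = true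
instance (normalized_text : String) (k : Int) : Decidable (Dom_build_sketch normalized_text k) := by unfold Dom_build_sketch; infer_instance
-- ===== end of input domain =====

-- B builds the trigrams by zipping the word list with its shifted copies (fallback: a while
-- loop over a start index) and keeps only the k smallest hashes at any time in a bounded
-- ordered list, instead of an index loop plus sorting all hashes and slicing (objective: alternative).

-- ===== PORT A =====

-- Source A's _fnv32: for-loop over s.encode() as a foldl (ASCII domain: the bytes ARE the char codes)
def fnv32 (s : String) : Int :=
  (s.toList.foldl (fun h ch => ((h ^^^ ch.toNat) * 0x01000193) &&& 0xFFFFFFFF) 0x811C9DC5 : Nat)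

-- Source A's trigram loop with its break: recursion over the range list carrying the accumulator
-- (the f-string "{a} {b} {c}" is ' '.join of the three words, exact)
def gramsGo (words : List String) : List Int → List String → List String
  | [], acc => acc
  | i :: rest, acc =>
      let acc2 := acc ++ [PySem.Str.join " " [PySem.List.pyGetD words i "",
                                              PySem.List.pyGetD words (i+1) "",
                                              PySem.List.pyGetD words (i+2) ""]]
      if 512 ≤ acc2.length then acc2 else gramsGo words rest acc2

def build_sketch (normalized_text : String) (k : Int) : List Int :=
  let words := PySem.Str.split₀ normalized_text
  let trigrams := gramsGo words (PySem.List.pyRange 0 ((words.length : Int) - 2) 1) []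
  let trigrams :=
    if trigrams = [] then
      PySem.List.slice
        ((PySem.List.pyRange 0 (PySem.Str.len normalized_text - 3) 2).map
          (fun i => PySem.Str.slice normalized_text (some i) (some (i + 4))))
        none (some 512)
    else trigrams
  let hashes := PySem.List.sorted (trigrams.map fnv32) (fun x => x) false
  if k ≤ (hashes.length : Int) then PySem.List.slice hashes none (some k) else hashes

-- ===== PORT B =====

-- Source B's _fnv32 (kept verbatim from Source A, as its docstring says): same foldl transliteration
def fnvB (s : String) : Int :=
  (s.toList.foldl (fun h ch => ((h ^^^ ch.toNat) * 0x01000193) &&& 0xFFFFFFFF) 0x811C9DC5 : Nat)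

-- Source B's 'while lo < len(ys) and ys[lo] <= x: lo += 1' — the index scan as structural recursion
def insPos (x : Int) : List Int → Nat
  | [] => 0
  | y :: ys => if y ≤ x then insPos x ys + 1 else 0

-- Source B's _insert_bounded (ys[:lo] + [x] + ys[lo:], then zs[:-1] when k < len(zs))
def insertBounded (x : Int) (ys : List Int) (k : Int) : List Int :=
  let lo := insPos x ys
  let zs := ys.take lo ++ [x] ++ ys.drop lo
  if k < (zs.length : Int) then PySem.List.slice zs none (some (-1)) else zs

-- Source B's fallback while loop ('len(t)' is 't.toList.length' on every string)
def fourGo (t : String) (i : Nat) (acc : List String) : List String :=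
  if i + 4 ≤ t.toList.length ∧ acc.length < 512 then
    fourGo t (i + 2) (acc ++ [PySem.Str.slice t (some (i : Int)) (some ((i : Int) + 4))])
  else acc
termination_by t.toList.length - i
decreasing_by omega

def build_sketch_alt (normalized_text : String) (k : Int) : List Int :=
  let words := PySem.Str.split₀ normalized_text
  -- zip(words, words[1:], words[2:]) modelled as nested pairs, then [:512]
  let grams := PySem.List.slice
    (((words.zip (words.drop 1)).zip (words.drop 2)).map
      (fun p => PySem.Str.join " " [p.1.1, p.1.2, p.2])) none (some 512)
  let grams := if grams = [] then fourGo normalized_text 0 [] else grams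
  grams.foldl (fun best g => insertBounded (fnvB g) best k) []

-- ===== PRECONDITION & SPEC =====
-- Pre_ excludes negative k, outside the natural sketch-size domain: there A's value is an
-- artefact of Python's negative-slice semantics while B's bounded structure returns [].
def Pre_build_sketch (normalized_text : String) (k : Int) : Prop := 0 ≤ k
instance (normalized_text : String) (k : Int) : Decidable (Pre_build_sketch normalized_text k) := by
  unfold Pre_build_sketch; infer_instance
def pvWitness_build_sketch : String × Int := ("a b c d", 2)

def Spec_build_sketch (normalized_text : String) (k : Int) (out : List Int) : Prop := out = build_sketch_alt normalized_text k
instance (normalized_text : String) (k : Int) (out : List Int) : Decidable (Spec_build_sketch normalized_text k out) := by unfold Spec_build_sketch; infer_instance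

-- ===== CLAIM (what is proved, stated in full; the proofs are below) =====
def Claim_equal_build_sketch : Prop := ∀ (normalized_text : String) (k : Int), Dom_build_sketch normalized_text k → Pre_build_sketch normalized_text k → Spec_build_sketch normalized_text k (build_sketch normalized_text k)

-- ===== LEMMAS AND PROOFS =====

-- proof-side insertion (insert after any equal elements)
def insortR (x : Int) : List Int → List Int
  | [] => [x]
  | y :: ys => if y ≤ x then y :: insortR x ys else x :: y :: ys

-- B's take/append/drop insertion IS insortR
theorem insPos_split (x : Int) (ys : List Int) :
    ys.take (insPos x ys) ++ [x] ++ ys.drop (insPos x ys) = insortR x ys := by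
  induction ys with
  | nil => rfl
  | cons y ys ih =>
      simp only [insPos, insortR]
      split
      · simpa using ih
      · simp

-- insortR is PySem's insertBy with the '<' test
theorem insortR_eq_insertBy (x : Int) (ys : List Int) :
    insortR x ys = PySem.List.insertBy (fun a b => decide (a < b)) x ys := by
  induction ys with
  | nil => rfl
  | cons y ys ih =>
      simp only [insortR, PySem.List.insertBy]
      by_cases h : y ≤ x
      · rw [if_pos h, if_neg (by simpa using h), ih]
      · rw [if_neg h, if_pos (by simpa using not_le.mp h)]

theorem insortR_length (x : Int) (l : List Int) : (insortR x l).length = l.length + 1 := by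
  induction l with
  | nil => rfl
  | cons y ys ih => simp only [insortR]; split <;> simp [ih]

def sortL (xs : List Int) : List Int := xs.foldl (fun b h => insortR h b) []

theorem sorted_eq_sortL (xs : List Int) :
    PySem.List.sorted xs (fun x => x) false = sortL xs := by
  rw [PySem.List.sorted_eq_foldl_insertBy]
  unfold sortL
  congr 1
  funext b h
  exact (insortR_eq_insertBy h b).symm

-- B's loop body, on a Nat bound
def bstepN (n : Nat) (b : List Int) (h : Int) : List Int :=
  if n < (insortR h b).length then (insortR h b).dropLast else insortR h b

theorem bstepN_of_le (n : Nat) (b : List Int) (h : Int) (hb : b.length ≤ n) :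
    bstepN n b h = (insortR h b).take n := by
  unfold bstepN
  have hl := insortR_length h b
  split
  · rename_i hlt
    rw [List.dropLast_eq_take]
    congr 1
    omega
  · rename_i hge
    rw [List.take_of_length_le (by omega)]

theorem take_insortR_take (h : Int) (s : List Int) : ∀ n : Nat,
    ((insortR h (s.take n)).take n) = (insortR h s).take n := by
  induction s with
  | nil => intro n; simp
  | cons y ys ih =>
      intro n
      match n with
      | 0 => simp
      | Nat.succ m =>
          simp only [List.take_succ_cons, insortR]
          split
          · simp only [List.take_succ_cons]
            rw [ih m]
          · cases m with
            | zero => simp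
            | succ j =>
                simp only [List.take_succ_cons, List.take_take]
                have hmin : min j (j + 1) = j := by omega
                rw [hmin]

theorem foldl_bstepN (n : Nat) (xs : List Int) :
    xs.foldl (bstepN n) [] = (sortL xs).take n := by
  induction xs using List.reverseRecOn with
  | nil => simp [sortL]
  | append_singleton xs x ih =>
      rw [List.foldl_append]
      simp only [List.foldl_cons, List.foldl_nil]
      rw [ih, bstepN_of_le n _ x (List.length_take_le n _), take_insortR_take]
      simp only [sortL, List.foldl_append, List.foldl_cons, List.foldl_nil]

-- B's insertBounded step is bstepN (for 0 ≤ k)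
theorem insertBounded_eq_bstepN (x : Int) (ys : List Int) (k : Int) (hk : 0 ≤ k) :
    insertBounded x ys k = bstepN k.toNat ys x := by
  unfold insertBounded bstepN
  show (if k < ((ys.take (insPos x ys) ++ [x] ++ ys.drop (insPos x ys)).length : Int)
      then PySem.List.slice (ys.take (insPos x ys) ++ [x] ++ ys.drop (insPos x ys)) none (some (-1))
      else ys.take (insPos x ys) ++ [x] ++ ys.drop (insPos x ys)) = _
  rw [insPos_split]
  have : (k < ((insortR x ys).length : Int)) ↔ (k.toNat < (insortR x ys).length) := by omega
  by_cases hc : k.toNat < (insortR x ys).length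
  · rw [if_pos (this.mpr hc), if_pos hc, PySem.List.slice_to_neg_one]
  · rw [if_neg (fun hcc => hc (this.mp hcc)), if_neg hc]

-- === the gram lists of the two ports coincide ===

-- A's trigram loop is 'map then cap at 512'
theorem gramsGo_eq (words : List String)
    (f : Int → String)
    (hf : f = fun i => PySem.Str.join " " [PySem.List.pyGetD words i "",
                                            PySem.List.pyGetD words (i+1) "",
                                            PySem.List.pyGetD words (i+2) ""]) :
    ∀ (l : List Int) (acc : List String), acc.length < 512 →
      gramsGo words l acc = (acc ++ l.map f).take 512 := by
  intro l
  induction l with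
  | nil =>
      intro acc hacc
      simp [gramsGo, List.take_of_length_le (le_of_lt hacc)]
  | cons i rest ih =>
      intro acc hacc
      have hfa : ∀ j, f j = PySem.Str.join " " [PySem.List.pyGetD words j "",
          PySem.List.pyGetD words (j+1) "", PySem.List.pyGetD words (j+2) ""] := by
        intro j; rw [hf]
      simp only [gramsGo]
      rw [← hfa i]
      split
      · rename_i h512
        have hlen : (acc ++ [f i]).length = 512 := by
          simp at h512 ⊢; omega
        rw [List.map_cons, show acc ++ f i :: List.map f rest = (acc ++ [f i]) ++ List.map f rest by simp,
            ← hlen, List.take_left]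
      · rename_i h512
        rw [ih _ (by simp at h512 ⊢; omega)]
        simp

-- the zip-built trigram list equals A's index-built one
theorem zip_trigrams_eq (words : List String) :
    ((words.zip (words.drop 1)).zip (words.drop 2)).map
        (fun p => PySem.Str.join " " [p.1.1, p.1.2, p.2])
      = (PySem.List.pyRange 0 ((words.length : Int) - 2) 1).map
          (fun i => PySem.Str.join " " [PySem.List.pyGetD words i "",
                                         PySem.List.pyGetD words (i+1) "",
                                         PySem.List.pyGetD words (i+2) ""]) := by
  apply List.ext_getElem
  · simp [PySem.List.length_pyRange_one]
    omega
  · intro m h1 h2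
    have hm : m + 2 < words.length := by
      simp at h1; omega
    simp only [List.getElem_map, List.getElem_zip, List.getElem_drop,
        PySem.List.getElem_pyRange_one, zero_add]
    rw [PySem.List.pyGetD_eq_getElem words "" (by positivity) (by push_cast; omega)]
    rw [show (m : Int) + 1 = ((m + 1 : Nat) : Int) by push_cast; ring,
        show (m : Int) + 2 = ((m + 2 : Nat) : Int) by push_cast; ring]
    rw [PySem.List.pyGetD_eq_getElem words "" (by positivity) (by push_cast; omega),
        PySem.List.pyGetD_eq_getElem words "" (by positivity) (by push_cast; omega)]
    simp only [Int.toNat_natCast]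
    simp [Nat.add_comm]

-- step-2 range: nil and cons forms (derived from the library's pyRange_of_pos characterisation)
theorem pyRange_two_nil (a b : Int) (h : b ≤ a) : PySem.List.pyRange a b 2 = [] := by
  rw [PySem.List.pyRange_of_pos a b (by norm_num)]
  rw [if_neg (by omega)]
  rfl

theorem pyRange_two_cons (a b : Int) (h : a < b) :
    PySem.List.pyRange a b 2 = a :: PySem.List.pyRange (a + 2) b 2 := by
  rw [PySem.List.pyRange_of_pos a b (by norm_num), PySem.List.pyRange_of_pos (a+2) b (by norm_num)]
  rw [if_pos h]
  by_cases h2 : a + 2 < b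
  · rw [if_pos h2]
    have hc : (b - a + 2 - 1) / 2 = (b - (a + 2) + 2 - 1) / 2 + 1 := by omega
    have hnn : 0 ≤ (b - (a+2) + 2 - 1) / 2 := by omega
    rw [hc, show ((b - (a+2) + 2 - 1) / 2 + 1).toNat = ((b - (a+2) + 2 - 1) / 2).toNat + 1 by omega,
        List.range_succ_eq_map]
    refine List.cons_eq_cons.mpr ⟨by norm_num, ?_⟩
    rw [List.map_map]
    apply List.map_congr_left
    intro x _
    simp [Function.comp]
    push_cast
    ring
  · rw [if_neg h2]
    have hc : ((b - a + 2 - 1) / 2).toNat = 1 := by omega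
    rw [hc]
    simp

-- B's fallback while loop is A's capped comprehension
theorem fourGo_eq (t : String) :
    ∀ (d i : Nat) (acc : List String), t.toList.length - i ≤ d → acc.length < 512 →
      fourGo t i acc =
        (acc ++ (PySem.List.pyRange (i : Int) ((t.toList.length : Int) - 3) 2).map
          (fun j => PySem.Str.slice t (some j) (some (j + 4)))).take 512 := by
  intro d
  induction d with
  | zero =>
      intro i acc hd hacc
      rw [fourGo, if_neg (by omega), pyRange_two_nil _ _ (by omega)]
      simp [List.take_of_length_le (le_of_lt hacc)]
  | succ d ih =>
      intro i acc hd hacc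
      rw [fourGo]
      by_cases hcond : i + 4 ≤ t.toList.length
      · rw [if_pos ⟨hcond, hacc⟩]
        rw [pyRange_two_cons _ _ (by omega)]
        set acc2 := acc ++ [PySem.Str.slice t (some (i : Int)) (some ((i : Int) + 4))] with hacc2
        by_cases h512 : acc2.length < 512
        · rw [show ((i : Int) + 2) = ((i + 2 : Nat) : Int) by push_cast; ring] at *
          rw [ih (i + 2) acc2 (by omega) h512]
          simp [hacc2]
        · have hlen : acc2.length = 512 := by simp [hacc2] at h512 ⊢; omega
          rw [fourGo, if_neg (by omega)]
          rw [List.map_cons,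
              show acc ++ (PySem.Str.slice t (some (i:Int)) (some ((i:Int) + 4))) ::
                  (PySem.List.pyRange ((i:Int) + 2) ((t.toList.length : Int) - 3) 2).map
                    (fun j => PySem.Str.slice t (some j) (some (j + 4)))
                = acc2 ++ (PySem.List.pyRange ((i:Int) + 2) ((t.toList.length : Int) - 3) 2).map
                    (fun j => PySem.Str.slice t (some j) (some (j + 4))) from by simp [hacc2],
              ← hlen, List.take_left]
      · rw [if_neg (by tauto), pyRange_two_nil _ _ (by omega)]
        simp [List.take_of_length_le (le_of_lt hacc)]

-- ===== VERDICT (by name: the statement is the Claim_ definition above) =====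
theorem build_sketch_spec : Claim_equal_build_sketch := by
  intro t k _ hk
  unfold Spec_build_sketch build_sketch build_sketch_alt
  dsimp only
  have hk' : 0 ≤ k := hk
  set ws := PySem.Str.split₀ t with hws
  set f : Int → String := fun i => PySem.Str.join " " [PySem.List.pyGetD ws i "",
      PySem.List.pyGetD ws (i+1) "", PySem.List.pyGetD ws (i+2) ""] with hfdef
  -- the two gram lists coincide
  have hAtri : gramsGo ws (PySem.List.pyRange 0 ((ws.length : Int) - 2) 1) []
      = ((PySem.List.pyRange 0 ((ws.length : Int) - 2) 1).map f).take 512 := by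
    simpa using gramsGo_eq ws f hfdef _ [] (by norm_num)
  have hzip : PySem.List.slice
      (((ws.zip (ws.drop 1)).zip (ws.drop 2)).map
        (fun p => PySem.Str.join " " [p.1.1, p.1.2, p.2])) none (some 512)
      = ((PySem.List.pyRange 0 ((ws.length : Int) - 2) 1).map f).take 512 := by
    rw [zip_trigrams_eq, PySem.List.slice_to _ (by norm_num : (0:Int) ≤ 512)]
    rfl
  have hfall : fourGo t 0 []
      = PySem.List.slice
          ((PySem.List.pyRange 0 (PySem.Str.len t - 3) 2).map
            (fun i => PySem.Str.slice t (some i) (some (i + 4))))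
          none (some 512) := by
    rw [PySem.List.slice_to _ (by norm_num : (0:Int) ≤ 512), PySem.Str.len_eq]
    simpa using fourGo_eq t t.toList.length 0 [] (by omega) (by norm_num)
  rw [hzip, hAtri, hfall]
  -- both sides now consume the same gram list
  generalize (if ((PySem.List.pyRange 0 ((ws.length : Int) - 2) 1).map f).take 512 = [] then
      PySem.List.slice
        ((PySem.List.pyRange 0 (PySem.Str.len t - 3) 2).map
          (fun i => PySem.Str.slice t (some i) (some (i + 4))))
        none (some 512)
    else ((PySem.List.pyRange 0 ((ws.length : Int) - 2) 1).map f).take 512) = gs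
  -- selection: the bounded-insertion fold is 'sort then take k'
  have hfold : gs.foldl (fun best g => insertBounded (fnvB g) best k) []
      = (gs.map fnv32).foldl (bstepN k.toNat) [] := by
    rw [show (fnvB : String → Int) = fnv32 from rfl, List.foldl_map]
    apply List.foldl_ext
    intro b g _
    exact insertBounded_eq_bstepN (fnv32 g) b k hk'
  rw [hfold, foldl_bstepN, ← sorted_eq_sortL]
  set srt := PySem.List.sorted (gs.map fnv32) (fun x => x) false with hsrt
  by_cases hlen : k ≤ (srt.length : Int)
  · rw [if_pos hlen, PySem.List.slice_to srt hk']
  · rw [if_neg hlen, List.take_of_length_le (by omega)]
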